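-- pv_equiv track=rewrite | github.com/GuiBritx/Exercicios-CI-T | stringordenada.py | string_ordenada2
-- ===== SOURCE A (Python) =====
-- def string_ordenada2(idk):
--     lista = []
--     idk.sort()
--     lista2 = idk
--     n = len(lista2)
--     for i in range(int(n/2)):
--         lista.append(lista2[-1])
--         lista.append(lista2[0])
--         lista2 = lista2[1:-1]
--     if n % 2 != 0:
--         lista.append(idk[int(n/2)])
--     return lista
-- ===== SOURCE B (Python) =====
-- def string_ordenada2(idk):
--     # Like A, sorts idk in place (same observable mutation); then one two-pointer
--     # pass from both ends inward instead of A's repeated slicing.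
--     idk.sort()
--     out = []
--     lo, hi = 0, len(idk) - 1
--     while lo < hi:
--         out.append(idk[hi])
--         out.append(idk[lo])
--         lo += 1
--         hi -= 1
--     if lo == hi:
--         out.append(idk[lo])
--     return out
-- ===== Notes on version B (the rewrite author's own statement) =====
-- stated objective: faster
-- what changed: Replaces A's loop that copies the remaining list with a [1:-1] slice on every iteration by a single two-pointer pass over the sorted list, removing all slicing.
import Mathlib
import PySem

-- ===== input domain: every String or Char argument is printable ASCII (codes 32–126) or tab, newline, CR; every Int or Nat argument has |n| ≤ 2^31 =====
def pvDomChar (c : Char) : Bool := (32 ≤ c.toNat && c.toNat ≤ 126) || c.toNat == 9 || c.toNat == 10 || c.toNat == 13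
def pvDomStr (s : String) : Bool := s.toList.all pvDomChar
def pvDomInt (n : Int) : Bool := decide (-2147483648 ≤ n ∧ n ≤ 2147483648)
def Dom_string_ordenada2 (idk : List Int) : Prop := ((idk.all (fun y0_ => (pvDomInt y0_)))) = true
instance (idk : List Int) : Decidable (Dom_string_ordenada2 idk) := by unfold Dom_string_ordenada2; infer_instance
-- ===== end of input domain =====

-- ===== PORT A =====
-- B changes: one two-pointer pass over the sorted list instead of A's per-iteration [1:-1] slicing (faster).
-- Both A and B sort the argument list in place in Python; the theorems here are about the return value.
-- A's loop: each iteration appends lista2[-1] and lista2[0], then lista2 = lista2[1:-1].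
-- The indexing is always in range (the loop runs len/2 times), so the `.getD 0` defaults are never used.
def soAux : Nat → List Int → List Int → List Int
  | 0, _, lista => lista
  | k+1, lista2, lista =>
      soAux k (PySem.List.slice lista2 (some 1) (some (-1)))
        (lista ++ [PySem.List.pyGetD lista2 (-1) 0, PySem.List.pyGetD lista2 0 0])

def string_ordenada2 (idk : List Int) : List Int :=
  let lista2 := PySem.List.sorted idk (fun x => x) false
  let n := lista2.length
  let lista := soAux (n / 2) lista2 []
  if n % 2 ≠ 0 then lista ++ [PySem.List.pyGetD lista2 ((n / 2 : Nat) : Int) 0] else lista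

-- ===== PORT B =====
-- B's while-loop: two pointers lo, hi moving inward; indices are always in range when read.
def altLoop (s : List Int) (lo hi : Int) (acc : List Int) : List Int :=
  if lo < hi then
    altLoop s (lo + 1) (hi - 1) (acc ++ [PySem.List.pyGetD s hi 0, PySem.List.pyGetD s lo 0])
  else if lo = hi then acc ++ [PySem.List.pyGetD s lo 0]
  else acc
termination_by (hi - lo).toNat
decreasing_by omega

def string_ordenada2_alt (idk : List Int) : List Int :=
  let s := PySem.List.sorted idk (fun x => x) false
  altLoop s 0 ((s.length : Int) - 1) []

-- ===== PRECONDITION & SPEC =====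
def Spec_string_ordenada2 (idk : List Int) (out : List Int) : Prop := out = string_ordenada2_alt idk
instance (idk : List Int) (out : List Int) : Decidable (Spec_string_ordenada2 idk out) := by unfold Spec_string_ordenada2; infer_instance

-- ===== CLAIM (what is proved, stated in full; the proofs are below) =====
def Claim_equal_string_ordenada2 : Prop := ∀ (idk : List Int), Dom_string_ordenada2 idk → Spec_string_ordenada2 idk (string_ordenada2 idk)

-- ===== LEMMAS AND PROOFS =====

-- xs[1:-1] is drop-first-drop-last
lemma slice_one_neg_one (t : List Int) :
    PySem.List.slice t (some 1) (some (-1)) = t.tail.dropLast := by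
  simp [PySem.List.slice, PySem.List.clampIdx]
  rcases t with _ | ⟨x, t⟩
  · simp
  · simp [List.dropLast_eq_take]

-- reading t at an interior index i equals reading t.tail.dropLast at i-1
lemma pyGetD_tail_dropLast (t : List Int) (i : Int)
    (h1 : 1 ≤ i) (h2 : i ≤ (t.length : Int) - 2) :
    PySem.List.pyGetD t i 0 = PySem.List.pyGetD t.tail.dropLast (i - 1) 0 := by
  have hlen : t.tail.dropLast.length = t.length - 2 := by
    rcases t with _ | ⟨x, t⟩ <;> simp
  rw [PySem.List.pyGetD_eq_getElem _ _ (by omega) (by omega),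
      PySem.List.pyGetD_eq_getElem _ _ (by omega) (by omega)]
  rcases t with _ | ⟨x, t⟩
  · simp at h2; omega
  · simp only [List.tail_cons]
    rw [List.getElem_dropLast]
    have hi' : (i - 1).toNat + 1 = i.toNat := by omega
    simp only [← hi', List.getElem_cons_succ]

-- shifting the window: B's loop on t with pointers in [1, len-2] equals the loop on t.tail.dropLast shifted by one
lemma altLoop_shift_aux : ∀ (fuel : Nat) (t : List Int) (lo hi : Int) (acc : List Int),
    1 ≤ lo → hi ≤ (t.length : Int) - 2 → (hi - lo).toNat ≤ fuel →
    altLoop t lo hi acc = altLoop t.tail.dropLast (lo - 1) (hi - 1) acc := by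
  intro fuel
  induction fuel with
  | zero =>
      intro t lo hi acc hlo hhi hf
      have h1 : ¬ lo < hi := by omega
      rw [altLoop, if_neg h1, altLoop, if_neg (show ¬ lo - 1 < hi - 1 by omega)]
      by_cases he : lo = hi
      · rw [if_pos he, if_pos (show lo - 1 = hi - 1 by omega),
            pyGetD_tail_dropLast t lo hlo (by omega)]
      · rw [if_neg he, if_neg (show ¬ lo - 1 = hi - 1 by omega)]
  | succ k ih =>
      intro t lo hi acc hlo hhi hf
      by_cases h : lo < hi
      · rw [altLoop, if_pos h]
        conv_rhs => rw [altLoop]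
        rw [if_pos (show lo - 1 < hi - 1 by omega)]
        rw [pyGetD_tail_dropLast t hi (by omega) hhi,
            pyGetD_tail_dropLast t lo hlo (by omega)]
        rw [ih t (lo + 1) (hi - 1) _ (by omega) (by omega) (by omega)]
        rw [show lo + 1 - 1 = lo - 1 + 1 by omega]
      · rw [altLoop, if_neg h]
        conv_rhs => rw [altLoop]
        rw [if_neg (show ¬ lo - 1 < hi - 1 by omega)]
        by_cases he : lo = hi
        · rw [if_pos he, if_pos (show lo - 1 = hi - 1 by omega),
              pyGetD_tail_dropLast t lo hlo (by omega)]
        · rw [if_neg he, if_neg (show ¬ lo - 1 = hi - 1 by omega)]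

lemma altLoop_shift (t : List Int) (lo hi : Int) (acc : List Int)
    (hlo : 1 ≤ lo) (hhi : hi ≤ (t.length : Int) - 2) :
    altLoop t lo hi acc = altLoop t.tail.dropLast (lo - 1) (hi - 1) acc :=
  altLoop_shift_aux (hi - lo).toNat t lo hi acc hlo hhi le_rfl

-- the core equivalence, by strong induction on the length of the (sorted) list
lemma main_loop : ∀ (m : Nat) (t acc : List Int), t.length = m →
    altLoop t 0 ((m : Int) - 1) acc =
      (if m % 2 ≠ 0 then soAux (m / 2) t acc ++ [PySem.List.pyGetD t ((m / 2 : Nat) : Int) 0]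
       else soAux (m / 2) t acc) := by
  intro m
  induction m using Nat.strong_induction_on with
  | _ m ih =>
    intro t acc hlen
    match m, hlen with
    | 0, hlen =>
        rw [altLoop]
        norm_num [soAux]
    | 1, hlen =>
        rw [altLoop]
        norm_num [soAux]
    | (k+2), hlen =>
        have ht : t ≠ [] := by intro h; subst h; simp at hlen
        rw [altLoop, if_pos (show (0:Int) < ((k+2:Nat):Int) - 1 by push_cast; omega)]
        rw [altLoop_shift t (0 + 1) (((k+2:Nat):Int) - 1 - 1) _ (by omega) (by rw [hlen]; push_cast; omega)]
        have hlen' : t.tail.dropLast.length = k := by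
          rcases t with _ | ⟨x, t⟩
          · simp at hlen
          · simp at hlen ⊢; omega
        rw [show (0:Int) + 1 - 1 = 0 by omega,
            show ((k+2:Nat):Int) - 1 - 1 - 1 = ((k:Nat):Int) - 1 by push_cast; omega]
        rw [ih k (by omega) t.tail.dropLast _ hlen']
        -- unfold one step of A's loop on the right
        have hsub : (k + 2) / 2 = k / 2 + 1 := by omega
        rw [hsub, soAux, slice_one_neg_one]
        have hm1 : PySem.List.pyGetD t (-1) 0 = PySem.List.pyGetD t (((k+2:Nat):Int) - 1) 0 := by
          rw [PySem.List.pyGetD_neg_one t 0 ht,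
              PySem.List.pyGetD_eq_getElem _ _ (by push_cast; omega) (by push_cast; omega),
              List.getLast_eq_getElem]
          congr 1
          omega
        rw [hm1]
        by_cases hk : k % 2 = 0
        · have h2 : (k + 2) % 2 = 0 := by omega
          simp only [hk, h2, ne_eq, not_true_eq_false, if_false]
        · have h2 : ¬ (k + 2) % 2 = 0 := by omega
          simp only [hk, h2, ne_eq, not_false_eq_true, if_true]
          rw [pyGetD_tail_dropLast t ((k/2+1 : Nat):Int) (by push_cast; omega)
                (by rw [hlen]; push_cast; omega),
              show ((k/2+1 : Nat):Int) - 1 = ((k/2 : Nat):Int) by push_cast; omega]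

-- ===== VERDICT (by name: the statement is the Claim_ definition above) =====
theorem string_ordenada2_spec : Claim_equal_string_ordenada2 := by
  intro idk _
  unfold Spec_string_ordenada2 string_ordenada2 string_ordenada2_alt
  simp only []
  exact (main_loop (PySem.List.sorted idk (fun x => x) false).length
    (PySem.List.sorted idk (fun x => x) false) [] rfl).symm ▸ rfl
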